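-- pv_equiv track=rewrite | github.com/adeak/AoC2017 | day09.py | nester
-- ===== SOURCE A (Python) =====
-- def nester(patt,level):
--     """Recursively parse nested group structure and return score"""
--     # assume opening and closing parens
--     nextlevel = patt[1:-1]
--     if not nextlevel:
--         # we're out of levels here
--         return level
--     # need to find our children and sum their weights
--     numdiff = last = 0
--     partsum = level
--     for i,c in enumerate(nextlevel):
--         if c == '{':
--             numdiff += 1
--         elif c == '}':
--             numdiff -= 1
--         if numdiff == 0:
--             # we've got a complete group
--             partsum += nester(nextlevel[last:i+1],level+1)
--             last = i + 1
--     return partsum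
-- ===== SOURCE B (Python) =====
-- def segments(t):
--     """Split t into the chunks that end where the running brace balance returns to 0
--     (a trailing unbalanced part is dropped)."""
--     segs = []
--     diff = 0
--     last = 0
--     for i, c in enumerate(t):
--         diff += (c == '{') - (c == '}')
--         if diff == 0:
--             segs.append(t[last:i + 1])
--             last = i + 1
--     return segs
--
--
-- def nester(patt, level):
--     """Iterative worklist version: pop a group, count its level, push its children."""
--     total = 0
--     stack = [(patt, level)]
--     while stack:
--         s, lv = stack.pop()
--         total += lv
--         for seg in segments(s[1:-1]):
--             stack.append((seg, lv + 1))
--     return total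
-- ===== Notes on version B (the rewrite author's own statement) =====
-- stated objective: alternative
-- what changed: Replaces A's recursion (which interleaves scoring with scanning and threads partial sums through each call) by an explicit worklist: a separate segments() helper splits an interior into child chunks, and an iterative stack loop pops one group at a time, adds its level to a single accumulator and pushes its children.
import Mathlib
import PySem

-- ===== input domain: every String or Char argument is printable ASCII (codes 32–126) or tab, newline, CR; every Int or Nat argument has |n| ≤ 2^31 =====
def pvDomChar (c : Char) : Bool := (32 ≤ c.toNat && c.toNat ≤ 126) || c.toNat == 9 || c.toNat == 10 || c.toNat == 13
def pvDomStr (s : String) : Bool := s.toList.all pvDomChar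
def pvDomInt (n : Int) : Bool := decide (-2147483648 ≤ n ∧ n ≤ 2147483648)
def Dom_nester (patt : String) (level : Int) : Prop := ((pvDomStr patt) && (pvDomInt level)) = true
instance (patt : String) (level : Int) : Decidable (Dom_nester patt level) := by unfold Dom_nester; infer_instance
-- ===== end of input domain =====

-- B replaces A's score-threading recursion by a segments() helper plus an explicit
-- worklist stack with a single accumulator (same cost; objective: alternative).
-- Both ports carry a Nat fuel argument purely as a structural-recursion totality
-- guard; each is called with fuel provably sufficient, so behaviour is unchanged.


-- xs[1:-1], exact via PySem.List.slice
def pyInner (cs : List Char) : List Char := PySem.List.slice cs (some 1) (some (-1))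

-- ===== PORT A =====
/-- Literal port of A. The Nat argument is fuel (a structural-recursion guard;
    fuel = cs.length always suffices, see `nesterL_fuel`): each recursive call
    is on `nextlevel[last:i+1]`, which is at least 2 shorter than `cs`.
    The `for i,c in enumerate(nextlevel)` loop with its `(numdiff, last, partsum)`
    state is the foldl over `enumerate nextlevel`. -/
def nesterL : Nat → List Char → Int → Int
  | 0, _, level => level
  | n + 1, cs, level =>
    let t := pyInner cs
    if t = [] then level
    else
      (List.foldl
        (fun (s : Int × Int × Int) (q : Int × Char) =>
          let nd := if q.2 = '{' then s.1 + 1 else if q.2 = '}' then s.1 - 1 else s.1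
          if nd = 0 then
            -- nextlevel[last:i+1], exact via PySem.List.slice
            (nd, q.1 + 1,
              s.2.2 + nesterL n (PySem.List.slice t (some s.2.1) (some (q.1 + 1))) (level + 1))
          else (nd, s.2.1, s.2.2))
        (0, 0, level) (PySem.List.enumerate t 0)).2.2

def nester (patt : String) (level : Int) : Int := nesterL patt.toList.length patt.toList level

-- ===== PORT B =====
/-- B's `segments` loop: `diff += (c == '{') - (c == '}')`, chunk at each zero. -/
def segLoop (t : List Char) (l : List (Int × Char)) (diff last : Int)
    (segs : List (List Char)) : List (List Char) :=
  match l with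
  | [] => segs
  | (i, c) :: rest =>
    let d := diff + (if c = '{' then 1 else 0) - (if c = '}' then 1 else 0)
    if d = 0 then
      segLoop t rest d (i + 1) (segs ++ [PySem.List.slice t (some last) (some (i + 1))])
    else
      segLoop t rest d last segs

def segmentsL (t : List Char) : List (List Char) := segLoop t (PySem.List.enumerate t 0) 0 0 []

/-- B's `for seg in …: stack.append((seg, lv))`; list head is the stack top. -/
def bPush (segs : List (List Char)) (lv : Int) (st : List (List Char × Int)) :
    List (List Char × Int) :=
  segs.foldl (fun st seg => (seg, lv) :: st) st

/-- B's `while stack:` loop with the running total. The Nat argument is fuel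
    (a structural-recursion guard; fuel = Σ 2^|s| over the stack always
    suffices, see `bLoop_eq`): popping `(s, lv)` pushes chunks of `s[1:-1]`. -/
def bLoop : Nat → List (List Char × Int) → Int → Int
  | _, [], total => total
  | 0, _ :: _, total => total
  | n + 1, (s, lv) :: rest, total =>
    bLoop n (bPush (segmentsL (pyInner s)) (lv + 1) rest) (total + lv)

def nester_alt (patt : String) (level : Int) : Int :=
  bLoop (2 ^ patt.toList.length) [(patt.toList, level)] 0

-- ===== PRECONDITION & SPEC =====
def Spec_nester (patt : String) (level : Int) (out : Int) : Prop := out = nester_alt patt level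
instance (patt : String) (level : Int) (out : Int) : Decidable (Spec_nester patt level out) := by unfold Spec_nester; infer_instance

-- ===== CLAIM (what is proved, stated in full; the proofs are below) =====
def Claim_equal_nester : Prop := ∀ (patt : String) (level : Int), Dom_nester patt level → Spec_nester patt level (nester patt level)

-- ===== LEMMAS AND PROOFS =====

theorem length_pyInner (cs : List Char) : (pyInner cs).length = cs.length - 2 := by
  simp [pyInner, PySem.List.length_slice]
  omega

theorem pyInner_nil : pyInner ([] : List Char) = [] := by
  simp [pyInner, PySem.List.length_slice, ← List.length_eq_zero_iff]

theorem slice_length_le (t : List Char) (a b : Int) :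
    (PySem.List.slice t (some a) (some b)).length ≤ t.length := by
  simp [PySem.List.length_slice]
  have := PySem.List.clampIdx_le t.length b
  omega

theorem nesterL_empty (n : Nat) (cs : List Char) (level : Int) (h : pyInner cs = []) :
    nesterL n cs level = level := by
  cases n with
  | zero => rfl
  | succ n => simp [nesterL, h]

/-- fuel irrelevance: any fuel ≥ cs.length computes the same value. -/
theorem nesterL_fuel (n : Nat) : ∀ (m : Nat) (cs : List Char) (level : Int),
    cs.length ≤ n → cs.length ≤ m → nesterL n cs level = nesterL m cs level := by
  induction n with
  | zero =>
    intro m cs level hn _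
    have : cs = [] := by rw [← List.length_eq_zero_iff]; omega
    subst this
    rw [nesterL_empty 0 [] level pyInner_nil, nesterL_empty m [] level pyInner_nil]
  | succ n ih =>
    intro m cs level hn hm
    by_cases h : pyInner cs = []
    · rw [nesterL_empty _ _ _ h, nesterL_empty _ _ _ h]
    · have hlen : (pyInner cs).length = cs.length - 2 := length_pyInner cs
      have hpos : 1 ≤ (pyInner cs).length := by
        rcases Nat.eq_zero_or_pos (pyInner cs).length with h0 | h0
        · exact absurd (List.length_eq_zero_iff.mp h0) h
        · omega
      cases m with
      | zero => omega
      | succ m =>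
        simp only [nesterL, if_neg h]
        congr 1
        congr 1
        apply List.foldl_ext
        intro s q _
        have hs : (PySem.List.slice (pyInner cs) (some s.2.1) (some (q.1 + 1))).length
            ≤ (pyInner cs).length := slice_length_le _ _ _
        rw [ih m (PySem.List.slice (pyInner cs) (some s.2.1) (some (q.1 + 1))) (level + 1)
          (by omega) (by omega)]

theorem segLoop_acc (t : List Char) (l : List (Int × Char)) :
    ∀ (d last : Int) (segs : List (List Char)),
      segLoop t l d last segs = segs ++ segLoop t l d last [] := by
  induction l with
  | nil => intro d last segs; simp [segLoop]
  | cons p rest ih =>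
    intro d last segs
    obtain ⟨i, c⟩ := p
    simp only [segLoop]
    by_cases hd : d + (if c = '{' then (1 : Int) else 0) - (if c = '}' then 1 else 0) = 0
    · rw [if_pos hd, if_pos hd, ih _ _ (segs ++ _), ih _ _ ([] ++ _), List.nil_append,
        List.append_assoc]
    · rw [if_neg hd, if_neg hd]
      exact ih _ _ segs

/-- every chunk produced by B's segments loop is a slice of t, hence no longer. -/
theorem segLoop_mem_len (t : List Char) (l : List (Int × Char)) :
    ∀ (d last : Int) (seg : List Char),
      seg ∈ segLoop t l d last [] → seg.length ≤ t.length := by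
  induction l with
  | nil => intro d last seg hmem; simp [segLoop] at hmem
  | cons p rest ih =>
    intro d last seg hmem
    obtain ⟨i, c⟩ := p
    simp only [segLoop] at hmem
    by_cases hd : d + (if c = '{' then (1 : Int) else 0) - (if c = '}' then 1 else 0) = 0
    · rw [if_pos hd, segLoop_acc] at hmem
      rcases List.mem_append.mp hmem with hmem | hmem
      · rcases List.mem_singleton.mp (by simpa using hmem) with rfl
        exact slice_length_le _ _ _
      · exact ih _ _ _ hmem
    · rw [if_neg hd] at hmem
      exact ih _ _ _ hmem

/-- A's if/elif update of numdiff equals B's arithmetic update of diff. -/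
theorem upd_eq (d : Int) (c : Char) :
    d + (if c = '{' then 1 else 0) - (if c = '}' then 1 else 0)
      = (if c = '{' then d + 1 else if c = '}' then d - 1 else d) := by
  split_ifs <;> simp_all

/-- A's loop from any state is the partial sum plus the recursive scores of B's chunks. -/
theorem foldl_go (n : Nat) (level : Int) (t : List Char) :
    ∀ (l : List (Int × Char)) (d last p : Int),
      (List.foldl
        (fun (s : Int × Int × Int) (q : Int × Char) =>
          let nd := if q.2 = '{' then s.1 + 1 else if q.2 = '}' then s.1 - 1 else s.1
          if nd = 0 then
            (nd, q.1 + 1,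
              s.2.2 + nesterL n (PySem.List.slice t (some s.2.1) (some (q.1 + 1))) (level + 1))
          else (nd, s.2.1, s.2.2))
        (d, last, p) l).2.2
      = p + ((segLoop t l d last []).map (fun seg => nesterL n seg (level + 1))).sum := by
  intro l
  induction l with
  | nil => intro d last p; simp [segLoop]
  | cons q rest ih =>
    intro d last p
    obtain ⟨i, c⟩ := q
    simp only [List.foldl_cons, segLoop, List.nil_append]
    rw [← upd_eq d c]
    by_cases hd : d + (if c = '{' then (1 : Int) else 0) - (if c = '}' then 1 else 0) = 0
    · rw [if_pos hd, if_pos hd, segLoop_acc, ih]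
      simp only [List.map_append, List.map_cons, List.map_nil, List.sum_append, List.sum_cons,
        List.sum_nil]
      omega
    · rw [if_neg hd, if_neg hd]
      exact ih _ _ _

/-- Characterisation shared by both ports: score = level + scores of the children. -/
theorem nesterL_eq (n : Nat) (cs : List Char) (level : Int) (hn : cs.length ≤ n) :
    nesterL n cs level
      = level
        + ((segmentsL (pyInner cs)).map (fun seg => nesterL seg.length seg (level + 1))).sum := by
  by_cases h : pyInner cs = []
  · rw [nesterL_empty (h := h), h]
    simp [segmentsL, PySem.List.enumerate_nil, segLoop]
  · have hlen : (pyInner cs).length = cs.length - 2 := length_pyInner cs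
    have hpos : 1 ≤ (pyInner cs).length := by
      rcases Nat.eq_zero_or_pos (pyInner cs).length with h0 | h0
      · exact absurd (List.length_eq_zero_iff.mp h0) h
      · omega
    cases n with
    | zero => omega
    | succ n =>
      simp only [nesterL, if_neg h]
      rw [foldl_go]
      congr 1
      congr 1
      rw [segmentsL]
      apply List.map_congr_left
      intro seg hseg
      have h1 : seg.length ≤ (pyInner cs).length := segLoop_mem_len _ _ _ _ _ hseg
      exact nesterL_fuel n seg.length seg (level + 1) (by omega) (le_refl _)

-- ── the stack measure Σ 2^|s| strictly drops at every pop (fuel sufficiency) ──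

theorem two_pow_add_le (a b : Nat) (ha : 1 ≤ a) (hb : 1 ≤ b) :
    2 ^ a + 2 ^ b ≤ 2 ^ (a + b) := by
  rw [pow_add]
  exact Nat.add_le_mul (Nat.one_lt_two_pow (by omega)) (Nat.one_lt_two_pow (by omega))

theorem segLoop_pow_sum (t : List Char) :
    ∀ (l : List (Int × Char)) (k last : Nat) (d : Int),
      l = (PySem.List.enumerate t 0).drop k → last ≤ k →
      ((segLoop t l d (last : Int) []).map (fun g => 2 ^ g.length)).sum
        ≤ 2 ^ (t.length - last + 1) - 2 := by
  intro l
  induction l with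
  | nil => intro k last d _ _; simp [segLoop]
  | cons p rest ih =>
    intro k last d hl hlast
    have hk : k < t.length := by
      by_contra hk
      have hnil : (PySem.List.enumerate t 0).drop k = [] := by
        rw [List.drop_eq_nil_iff]
        simp [PySem.List.length_enumerate]
        omega
      rw [hnil] at hl
      exact List.cons_ne_nil _ _ hl
    have hk' : k < (PySem.List.enumerate t 0).length := by
      simp [PySem.List.length_enumerate]; omega
    have hcons : p :: rest
        = (PySem.List.enumerate t 0)[k] :: (PySem.List.enumerate t 0).drop (k + 1) := by
      rw [← List.drop_eq_getElem_cons hk']; exact hl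
    have hrest : rest = (PySem.List.enumerate t 0).drop (k + 1) := (List.cons_eq_cons.mp hcons).2
    have hp : p = ((0 : Int) + (k : Int), t[k]'hk) := by
      have h1 := (List.cons_eq_cons.mp hcons).1
      rw [PySem.List.getElem_enumerate] at h1
      exact h1
    subst hp
    simp only [segLoop]
    by_cases hd : d + (if t[k]'hk = '{' then (1 : Int) else 0)
        - (if t[k]'hk = '}' then 1 else 0) = 0
    · rw [if_pos hd, segLoop_acc]
      have hcast : (0 : Int) + (k : Int) + 1 = ((k + 1 : Nat) : Int) := by push_cast; ring
      rw [hcast]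
      have hlen : (PySem.List.slice t (some (last : Int)) (some ((k + 1 : Nat) : Int))).length
          = k + 1 - last := by
        rw [PySem.List.slice_natCast]
        simp
        omega
      have hrec := ih (k + 1) (k + 1)
        ((d + if t[k]'hk = '{' then (1 : Int) else 0) - if t[k]'hk = '}' then 1 else 0)
        hrest (le_refl _)
      have hab := two_pow_add_le (k + 1 - last) (t.length - k) (by omega) (by omega)
      have he : (k + 1 - last) + (t.length - k) = t.length - last + 1 := by omega
      rw [he] at hab
      have h2a : 2 ≤ 2 ^ (k + 1 - last) := by
        calc 2 = 2 ^ 1 := rfl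
        _ ≤ 2 ^ (k + 1 - last) := Nat.pow_le_pow_right (by omega) (by omega)
      have h2b : 2 ≤ 2 ^ (t.length - k) := by
        calc 2 = 2 ^ 1 := rfl
        _ ≤ 2 ^ (t.length - k) := Nat.pow_le_pow_right (by omega) (by omega)
      have hsimp : t.length - (k + 1) + 1 = t.length - k := by omega
      rw [hsimp] at hrec
      simp only [List.map_append, List.map_cons, List.map_nil, List.sum_append, List.sum_cons,
        List.sum_nil, hlen]
      omega
    · rw [if_neg hd]
      exact ih (k + 1) last _ hrest (by omega)

theorem segmentsL_pow_sum (t : List Char) :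
    ((segmentsL t).map (fun g => 2 ^ g.length)).sum ≤ 2 ^ (t.length + 1) - 2 := by
  have := segLoop_pow_sum t (PySem.List.enumerate t 0) 0 0 0 (by simp) (le_refl 0)
  simpa using this

theorem bPush_pow_sum (segs : List (List Char)) (lv : Int) (st : List (List Char × Int)) :
    ((bPush segs lv st).map (fun p => 2 ^ p.1.length)).sum
      = (segs.map (fun g => 2 ^ g.length)).sum + (st.map (fun p => 2 ^ p.1.length)).sum := by
  induction segs generalizing st with
  | nil => simp [bPush]
  | cons g rest ih =>
    simp only [bPush, List.foldl_cons] at *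
    rw [ih ((g, lv) :: st)]
    simp
    omega

theorem bLoop_dec (s : List Char) (lv : Int) (rest : List (List Char × Int)) :
    ((bPush (segmentsL (pyInner s)) (lv + 1) rest).map (fun p => 2 ^ p.1.length)).sum
      < (((s, lv) :: rest).map (fun p => 2 ^ p.1.length)).sum := by
  rw [bPush_pow_sum]
  have h1 := segmentsL_pow_sum (pyInner s)
  have h2 : (pyInner s).length = s.length - 2 := length_pyInner s
  rw [h2] at h1
  have h3 : 2 ^ (s.length - 2 + 1) ≤ 2 ^ s.length ∨ s.length ≤ 1 := by
    by_cases h : s.length ≤ 1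
    · right; exact h
    · left; exact Nat.pow_le_pow_right (by omega) (by omega)
  have h4 : 1 ≤ 2 ^ s.length := Nat.one_le_two_pow
  simp only [List.map_cons, List.sum_cons]
  rcases h3 with h3 | h3
  · omega
  · have h5 : pyInner s = [] := by
      rw [← List.length_eq_zero_iff]; omega
    have h6 : segmentsL ([] : List Char) = [] := by
      simp [segmentsL, PySem.List.enumerate_nil, segLoop]
    rw [h5, h6]
    simp only [List.map_nil, List.sum_nil]
    omega

-- ── the worklist invariant ──

def stackSum (st : List (List Char × Int)) : Int :=
  (st.map (fun p => nesterL p.1.length p.1 p.2)).sum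

theorem bPush_stackSum (segs : List (List Char)) (lv : Int) (st : List (List Char × Int)) :
    stackSum (bPush segs lv st) = (segs.map (fun g => nesterL g.length g lv)).sum + stackSum st := by
  induction segs generalizing st with
  | nil => simp [bPush]
  | cons g rest ih =>
    simp only [bPush, List.foldl_cons] at *
    rw [ih ((g, lv) :: st)]
    simp [stackSum]
    omega

theorem bLoop_eq (n : Nat) : ∀ (st : List (List Char × Int)) (total : Int),
    (st.map (fun p => 2 ^ p.1.length)).sum ≤ n → bLoop n st total = total + stackSum st := by
  induction n with
  | zero =>
    intro st total hm
    rcases st with _ | ⟨⟨s, lv⟩, rest⟩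
    · simp [bLoop, stackSum]
    · exfalso
      have h4 : 1 ≤ 2 ^ s.length := Nat.one_le_two_pow
      simp only [List.map_cons, List.sum_cons] at hm
      omega
  | succ n ih =>
    intro st total hm
    rcases st with _ | ⟨⟨s, lv⟩, rest⟩
    · simp [bLoop, stackSum]
    · rw [bLoop]
      have hd := bLoop_dec s lv rest
      rw [ih _ _ (by omega), bPush_stackSum]
      simp only [stackSum, List.map_cons, List.sum_cons]
      rw [nesterL_eq s.length s lv (le_refl _)]
      rw [segmentsL]
      omega

-- ===== VERDICT (by name: the statement is the Claim_ definition above) =====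
theorem nester_spec : Claim_equal_nester := by
  intro patt level _
  unfold Spec_nester nester nester_alt
  rw [bLoop_eq _ _ _ (by simp)]
  simp [stackSum]
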